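-- pv_equiv track=rewrite | github.com/shutech2001/PROWL | experiments/run_num_experiments.py | manuscript_comparison_scenario_ids
-- ===== SOURCE A (Python) =====
-- MANUSCRIPT_COMPARISON_SCENARIOS = (
--     "linear_scope_invariant",
--     "clinical_triage_nuisance_conflict",
-- )
--
-- def manuscript_comparison_scenario_ids(available_scenario_ids: list[str]) -> list[str]:
--     ordered: list[str] = []
--     seen: set[str] = set()
--     for scenario_id in MANUSCRIPT_COMPARISON_SCENARIOS:
--         if scenario_id in available_scenario_ids and scenario_id not in seen:
--             ordered.append(scenario_id)
--             seen.add(scenario_id)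
--     for scenario_id in available_scenario_ids:
--         if scenario_id not in seen:
--             ordered.append(scenario_id)
--             seen.add(scenario_id)
--         if len(ordered) >= 2:
--             break
--     return ordered[:2]
-- ===== SOURCE B (Python) =====
-- MANUSCRIPT_COMPARISON_SCENARIOS = (
--     "linear_scope_invariant",
--     "clinical_triage_nuisance_conflict",
-- )
--
-- def _first_not_in(xs, excluded):
--     for x in xs:
--         if x not in excluded:
--             return x
--     return None
--
-- def manuscript_comparison_scenario_ids(available_scenario_ids: list[str]) -> list[str]:
--     p1, p2 = MANUSCRIPT_COMPARISON_SCENARIOS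
--     has1 = p1 in available_scenario_ids
--     has2 = p2 in available_scenario_ids
--     if has1 and has2:
--         return [p1, p2]
--     if has1 or has2:
--         p = p1 if has1 else p2
--         nxt = _first_not_in(available_scenario_ids, (p,))
--         return [p] if nxt is None else [p, nxt]
--     a = _first_not_in(available_scenario_ids, ())
--     if a is None:
--         return []
--     b = _first_not_in(available_scenario_ids, (a,))
--     return [a] if b is None else [a, b]
-- ===== Notes on version B (the rewrite author's own statement) =====
-- stated objective: alternative
-- what changed: Replaces A's seen-set accumulation loops with a four-way case analysis on which of the two priority ids are present: each case returns a literal pair or the priority id plus the first differing element found by a single find-first scan, with no dedup accumulator or break-at-two loop.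
import Mathlib
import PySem

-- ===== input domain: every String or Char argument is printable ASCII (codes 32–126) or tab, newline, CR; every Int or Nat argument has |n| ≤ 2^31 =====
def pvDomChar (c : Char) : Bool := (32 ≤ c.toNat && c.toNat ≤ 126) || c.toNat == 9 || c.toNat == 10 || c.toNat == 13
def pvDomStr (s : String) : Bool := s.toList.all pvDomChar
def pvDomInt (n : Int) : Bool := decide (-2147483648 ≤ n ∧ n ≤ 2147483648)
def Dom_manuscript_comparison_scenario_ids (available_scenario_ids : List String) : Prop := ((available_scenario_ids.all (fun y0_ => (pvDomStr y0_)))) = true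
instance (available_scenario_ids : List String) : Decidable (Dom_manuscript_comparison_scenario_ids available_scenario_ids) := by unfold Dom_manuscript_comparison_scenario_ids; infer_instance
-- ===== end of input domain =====

-- B replaces A's seen-set loops by a four-way case analysis on which priority ids are present,
-- each case returning a literal pair or the priority id plus one find-first scan; objective: alternative.

-- ===== PORT A =====
def pvPrio1 : String := "linear_scope_invariant"
def pvPrio2 : String := "clinical_triage_nuisance_conflict"
def pvPrio : List String := [pvPrio1, pvPrio2]

-- A's second loop: append each unseen id, break as soon as `ordered` has ≥ 2 elements
def pvLoopA : List String → List String → PySem.Set String → List String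
  | [], ordered, _ => ordered
  | x :: xs, ordered, seen =>
    let st := if PySem.Set.contains seen x then (ordered, seen)
              else (ordered ++ [x], PySem.Set.add seen x)
    if 2 ≤ st.1.length then st.1 else pvLoopA xs st.1 st.2

def manuscript_comparison_scenario_ids (available_scenario_ids : List String) : List String :=
  let init := pvPrio.foldl (fun (st : List String × PySem.Set String) sid =>
      if available_scenario_ids.contains sid && !(PySem.Set.contains st.2 sid)
      then (st.1 ++ [sid], PySem.Set.add st.2 sid) else st) ([], PySem.Set.empty)
  (pvLoopA available_scenario_ids init.1 init.2).take 2

-- ===== PORT B =====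
-- B's helper `_first_not_in`: first element of xs not in `excluded` (None if none)
def pvFirstNotIn (xs excluded : List String) : Option String :=
  xs.find? (fun x => !excluded.contains x)

def manuscript_comparison_scenario_ids_alt (available_scenario_ids : List String) : List String :=
  let has1 := available_scenario_ids.contains pvPrio1
  let has2 := available_scenario_ids.contains pvPrio2
  if has1 && has2 then [pvPrio1, pvPrio2]
  else if has1 || has2 then
    let p := if has1 then pvPrio1 else pvPrio2
    match pvFirstNotIn available_scenario_ids [p] with
    | none => [p]
    | some nxt => [p, nxt]
  else
    match pvFirstNotIn available_scenario_ids [] with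
    | none => []
    | some a =>
      match pvFirstNotIn available_scenario_ids [a] with
      | none => [a]
      | some b => [a, b]

-- ===== PRECONDITION & SPEC =====
def Spec_manuscript_comparison_scenario_ids (available_scenario_ids : List String) (out : List String) : Prop := out = manuscript_comparison_scenario_ids_alt available_scenario_ids
instance (available_scenario_ids : List String) (out : List String) : Decidable (Spec_manuscript_comparison_scenario_ids available_scenario_ids out) := by unfold Spec_manuscript_comparison_scenario_ids; infer_instance

-- ===== CLAIM =====
def Claim_equal_manuscript_comparison_scenario_ids : Prop := ∀ (available_scenario_ids : List String), Dom_manuscript_comparison_scenario_ids available_scenario_ids → Spec_manuscript_comparison_scenario_ids available_scenario_ids (manuscript_comparison_scenario_ids available_scenario_ids)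

-- ===== LEMMAS AND PROOFS =====
-- A's loop only appends to `ordered`
theorem pvLoopA_extends (xs : List String) (ordered : List String) (seen : PySem.Set String) :
    ∃ t, pvLoopA xs ordered seen = ordered ++ t := by
  induction xs generalizing ordered seen with
  | nil => exact ⟨[], by simp [pvLoopA]⟩
  | cons x xs ih =>
    simp only [pvLoopA]
    by_cases h : PySem.Set.contains seen x = true
    · simp only [h, if_true]
      by_cases hl : 2 ≤ ordered.length
      · exact ⟨[], by rw [if_pos hl, List.append_nil]⟩
      · rw [if_neg hl]; exact ih ordered seen
    · simp only [h, if_false, Bool.false_eq_true]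
      by_cases hl : 2 ≤ (ordered ++ [x]).length
      · exact ⟨[x], by rw [if_pos hl]⟩
      · rw [if_neg hl]
        obtain ⟨t, ht⟩ := ih (ordered ++ [x]) (PySem.Set.add seen x)
        exact ⟨x :: t, by rw [ht, List.append_assoc]; rfl⟩

-- singleton set membership, as a Bool equation
theorem pv_contains_singleton (p y : String) : PySem.Set.contains [p] y = (y == p) := by
  rw [PySem.Set.contains_eq_listContains]; simp [beq_eq_decide]

theorem pv_listContains_singleton (p y : String) : ([p].contains y) = (y == p) := by
  simp [beq_eq_decide]

-- A's loop from the one-element state ([p], {p}) returns [p] plus the first element ∉ [p], if any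
theorem pvLoopA_single (xs : List String) (p : String) :
    (pvLoopA xs [p] [p]).take 2
      = (match xs.find? (fun x => !([p].contains x)) with
         | none => [p]
         | some b => [p, b]) := by
  induction xs with
  | nil => simp [pvLoopA]
  | cons x xs ih =>
    simp only [pvLoopA, List.find?]
    by_cases h : x = p
    · subst h
      have hc : PySem.Set.contains [x] x = true := by
        rw [pv_contains_singleton]; simp
      have hlc : ([x].contains x) = true := by rw [pv_listContains_singleton]; simp
      simp only [hc, if_true, List.length_singleton, hlc, Bool.not_true]
      rw [if_neg (by omega : ¬ (2 ≤ 1))]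
      exact ih
    · have hc : PySem.Set.contains [p] x = false := by
        rw [pv_contains_singleton]; exact beq_eq_false_iff_ne.mpr h
      have hlc : ([p].contains x) = false := by
        rw [pv_listContains_singleton]; exact beq_eq_false_iff_ne.mpr h
      simp only [hc, if_false, Bool.false_eq_true, hlc, Bool.not_false]
      rw [if_pos (by simp : 2 ≤ ([p] ++ [x]).length)]
      rfl

-- ===== VERDICT =====
theorem manuscript_comparison_scenario_ids_spec : Claim_equal_manuscript_comparison_scenario_ids := by
  intro avail _
  unfold Spec_manuscript_comparison_scenario_ids
  unfold manuscript_comparison_scenario_ids manuscript_comparison_scenario_ids_alt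
  have hce : ∀ s : String, PySem.Set.contains PySem.Set.empty s = false := fun _ => rfl
  have hadd : ∀ p : String, PySem.Set.add PySem.Set.empty p = [p] := fun _ => rfl
  cases hL : avail.contains pvPrio1 <;> cases hC : avail.contains pvPrio2 <;>
    simp only [pvPrio, List.foldl_cons, List.foldl_nil, hL, hC, hce, hadd,
      Bool.not_false, Bool.false_and, Bool.true_and, Bool.and_true, Bool.and_false,
      Bool.false_eq_true, if_false, if_true, Bool.false_or, Bool.true_or,
      List.nil_append]
  · -- neither present
    cases avail with
    | nil => simp [pvLoopA, pvFirstNotIn]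
    | cons a as =>
      simp only [pvLoopA, hce, Bool.false_eq_true, if_false, hadd, List.nil_append,
        List.length_singleton]
      rw [if_neg (by omega : ¬ (2 ≤ 1))]
      rw [pvLoopA_single as a]
      have hlc : ([a].contains a) = true := by rw [pv_listContains_singleton]; simp
      simp [pvFirstNotIn, List.find?]
  · -- only pvPrio2 present
    rw [pvLoopA_single avail pvPrio2]
    rfl
  · -- only pvPrio1 present
    rw [pvLoopA_single avail pvPrio1]
    rfl
  · -- both present
    have hc12 : PySem.Set.contains [pvPrio1] pvPrio2 = false := by decide
    simp only [hc12, Bool.not_false, if_true]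
    have hadd2 : PySem.Set.add [pvPrio1] pvPrio2 = [pvPrio1, pvPrio2] := by decide
    obtain ⟨t, ht⟩ := pvLoopA_extends avail ([pvPrio1] ++ [pvPrio2]) (PySem.Set.add [pvPrio1] pvPrio2)
    rw [ht]
    simp
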